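-- pv_equiv track=rewrite | github.com/Peacefulcatt/yolo_kidney_stone | flexible_ureteroscopy_detection_opencv.py | calculate_touching_arm_heights
-- ===== SOURCE A (Python) =====
-- def calculate_touching_arm_heights(contour, x, y, w, h, num_pixels=10):
--     touching_arm_heights = []
--
--     # Calculate heights along both left and right touching arms
--     for direction in [1, -1]:  # 1 for right, -1 for left
--         arm_x = x if direction == -1 else x + w
--         arm_points = [point[0][1] for point in contour if arm_x - num_pixels <= point[0][0] <= arm_x + num_pixels]
--
--         if arm_points:
--             arm_height = max(arm_points) - min(arm_points)
--             touching_arm_heights.append(arm_height)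
--
--     return touching_arm_heights
-- ===== SOURCE B (Python) =====
-- def calculate_touching_arm_heights(contour, x, y, w, h, num_pixels=10):
--     # One pass over the contour, keeping running (min_y, max_y) per arm.
--     right_lo, right_hi = x + w - num_pixels, x + w + num_pixels
--     left_lo, left_hi = x - num_pixels, x + num_pixels
--     r = None  # (min_y, max_y) near the right arm x+w
--     l = None  # (min_y, max_y) near the left arm x
--     for point in contour:
--         px = point[0][0]
--         in_r = right_lo <= px <= right_hi
--         in_l = left_lo <= px <= left_hi
--         if in_r or in_l:
--             py = point[0][1]
--             if in_r:
--                 r = (py, py) if r is None else (min(r[0], py), max(r[1], py))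
--             if in_l:
--                 l = (py, py) if l is None else (min(l[0], py), max(l[1], py))
--     heights = []
--     if r is not None:
--         heights.append(r[1] - r[0])
--     if l is not None:
--         heights.append(l[1] - l[0])
--     return heights
-- ===== Notes on version B (the rewrite author's own statement) =====
-- stated objective: alternative
-- what changed: Replaces the two-direction loop that builds an intermediate list per arm and then scans it twice with max()/min() by a single pass over the contour maintaining online (min_y, max_y) accumulators for both arms at once.
import Mathlib
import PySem

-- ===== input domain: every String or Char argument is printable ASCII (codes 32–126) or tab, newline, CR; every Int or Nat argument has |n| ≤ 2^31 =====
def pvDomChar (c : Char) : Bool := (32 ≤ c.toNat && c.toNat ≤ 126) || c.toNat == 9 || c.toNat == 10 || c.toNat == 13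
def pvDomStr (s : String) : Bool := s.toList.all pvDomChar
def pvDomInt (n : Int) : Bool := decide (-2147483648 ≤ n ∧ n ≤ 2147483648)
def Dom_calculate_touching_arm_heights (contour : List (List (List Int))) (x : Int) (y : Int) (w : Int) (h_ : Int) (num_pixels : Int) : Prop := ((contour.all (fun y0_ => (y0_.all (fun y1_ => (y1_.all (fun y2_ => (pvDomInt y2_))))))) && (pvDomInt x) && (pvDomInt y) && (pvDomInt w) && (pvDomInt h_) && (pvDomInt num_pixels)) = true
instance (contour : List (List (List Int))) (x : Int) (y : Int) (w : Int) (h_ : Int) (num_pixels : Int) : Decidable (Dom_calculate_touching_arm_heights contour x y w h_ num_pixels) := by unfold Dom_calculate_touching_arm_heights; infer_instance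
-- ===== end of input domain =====

-- B replaces A's two filter-then-max/min passes by one online pass keeping running (min,max) per arm; alternative decomposition, same cost.


-- ===== PORT A =====
-- point[0][0] / point[0][1]; Pre_ guarantees the pyGet? lookups succeed, so the .getD defaults are never taken inside Pre_
def pvArmPoints (contour : List (List (List Int))) (arm_x : Int) (num_pixels : Int) : List Int :=
  contour.foldr (fun point acc =>
    let p0 := (PySem.List.pyGet? point 0).getD []
    let px := (PySem.List.pyGet? p0 0).getD 0
    if arm_x - num_pixels ≤ px ∧ px ≤ arm_x + num_pixels then
      ((PySem.List.pyGet? p0 1).getD 0) :: acc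
    else acc) []

def calculate_touching_arm_heights (contour : List (List (List Int))) (x : Int) (y : Int) (w : Int) (h_ : Int) (num_pixels : Int) : List Int :=
  [(1 : Int), -1].foldl (fun touching_arm_heights direction =>
    let arm_x := if direction = -1 then x else x + w
    let arm_points := pvArmPoints contour arm_x num_pixels
    if arm_points ≠ [] then
      let arm_height := ((PySem.List.max? arm_points (fun v => v)).getD 0)
                        - ((PySem.List.min? arm_points (fun v => v)).getD 0)
      touching_arm_heights ++ [arm_height]
    else touching_arm_heights) []

-- ===== PORT B =====
-- one fold over contour with a pair of Option (min,max) accumulators, right arm first in the output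
def pvUpd (lo hi px py : Int) (s : Option (Int × Int)) : Option (Int × Int) :=
  if lo ≤ px ∧ px ≤ hi then
    some (match s with
          | none => (py, py)
          | some (mn, mx) => (min mn py, max mx py))
  else s

def calculate_touching_arm_heights_alt (contour : List (List (List Int))) (x : Int) (y : Int) (w : Int) (h_ : Int) (num_pixels : Int) : List Int :=
  let st := contour.foldl (fun (st : Option (Int × Int) × Option (Int × Int)) point =>
      let p0 := (PySem.List.pyGet? point 0).getD []
      let px := (PySem.List.pyGet? p0 0).getD 0
      let py := (PySem.List.pyGet? p0 1).getD 0
      (pvUpd (x + w - num_pixels) (x + w + num_pixels) px py st.1,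
       pvUpd (x - num_pixels) (x + num_pixels) px py st.2)) (none, none)
  (match st.1 with | some (mn, mx) => [mx - mn] | none => []) ++
  (match st.2 with | some (mn, mx) => [mx - mn] | none => [])

-- ===== PRECONDITION & SPEC =====
-- Pre_: exactly the inputs where Python A returns: every point and its point[0] are nonempty,
-- and point[0] has a second coordinate whenever point[0][0] lies in either arm window (else A raises IndexError).
def Pre_calculate_touching_arm_heights (contour : List (List (List Int))) (x : Int) (y : Int) (w : Int) (h_ : Int) (num_pixels : Int) : Prop :=
  ∀ point ∈ contour, 1 ≤ point.length ∧ 1 ≤ (point.headD []).length ∧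
    (((x - num_pixels ≤ (point.headD []).headD 0 ∧ (point.headD []).headD 0 ≤ x + num_pixels) ∨
      (x + w - num_pixels ≤ (point.headD []).headD 0 ∧ (point.headD []).headD 0 ≤ x + w + num_pixels)) →
      2 ≤ (point.headD []).length)
instance (contour : List (List (List Int))) (x : Int) (y : Int) (w : Int) (h_ : Int) (num_pixels : Int) : Decidable (Pre_calculate_touching_arm_heights contour x y w h_ num_pixels) := by unfold Pre_calculate_touching_arm_heights; infer_instance

def pvWitness_calculate_touching_arm_heights : List (List (List Int)) × Int × Int × Int × Int × Int :=
  ([[[0, 3]], [[5, 7]]], 0, 0, 5, 4, 2)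

def Spec_calculate_touching_arm_heights (contour : List (List (List Int))) (x : Int) (y : Int) (w : Int) (h_ : Int) (num_pixels : Int) (out : List Int) : Prop := out = calculate_touching_arm_heights_alt contour x y w h_ num_pixels
instance (contour : List (List (List Int))) (x : Int) (y : Int) (w : Int) (h_ : Int) (num_pixels : Int) (out : List Int) : Decidable (Spec_calculate_touching_arm_heights contour x y w h_ num_pixels out) := by unfold Spec_calculate_touching_arm_heights; infer_instance

-- ===== CLAIM (what is proved, stated in full; the proofs are below) =====
def Claim_equal_calculate_touching_arm_heights : Prop := ∀ (contour : List (List (List Int))) (x : Int) (y : Int) (w : Int) (h_ : Int) (num_pixels : Int), Dom_calculate_touching_arm_heights contour x y w h_ num_pixels → Pre_calculate_touching_arm_heights contour x y w h_ num_pixels → Spec_calculate_touching_arm_heights contour x y w h_ num_pixels (calculate_touching_arm_heights contour x y w h_ num_pixels)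

-- ===== LEMMAS AND PROOFS =====

-- consume a list of y-values into an Option (min,max) accumulator
def pvMM (s : Option (Int × Int)) : List Int → Option (Int × Int)
  | [] => s
  | v :: t => pvMM (some (match s with
                          | none => (v, v)
                          | some (mn, mx) => (min mn v, max mx v))) t

theorem pvMM_some (a b : Int) (L : List Int) :
    pvMM (some (a, b)) L = some (L.foldl min a, L.foldl max b) := by
  induction L generalizing a b with
  | nil => simp [pvMM]
  | cons v t ih => simp [pvMM, List.foldl, ih]

-- B's pair fold splits into two independent single-arm folds
theorem pvFold_pair (contour : List (List (List Int))) (rlo rhi llo lhi : Int)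
    (s : Option (Int × Int) × Option (Int × Int)) :
    contour.foldl (fun (st : Option (Int × Int) × Option (Int × Int)) point =>
      let p0 := (PySem.List.pyGet? point 0).getD []
      let px := (PySem.List.pyGet? p0 0).getD 0
      let py := (PySem.List.pyGet? p0 1).getD 0
      (pvUpd rlo rhi px py st.1, pvUpd llo lhi px py st.2)) s =
    (contour.foldl (fun st point =>
        let p0 := (PySem.List.pyGet? point 0).getD []
        pvUpd rlo rhi ((PySem.List.pyGet? p0 0).getD 0) ((PySem.List.pyGet? p0 1).getD 0) st) s.1,
     contour.foldl (fun st point =>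
        let p0 := (PySem.List.pyGet? point 0).getD []
        pvUpd llo lhi ((PySem.List.pyGet? p0 0).getD 0) ((PySem.List.pyGet? p0 1).getD 0) st) s.2) := by
  induction contour generalizing s with
  | nil => rfl
  | cons point rest ih => simp only [List.foldl]; exact ih _

-- a single-arm fold computes the online min/max of the comprehension's list
theorem pvFold_arm (contour : List (List (List Int))) (aX np : Int) (s : Option (Int × Int)) :
    contour.foldl (fun st point =>
        let p0 := (PySem.List.pyGet? point 0).getD []
        pvUpd (aX - np) (aX + np) ((PySem.List.pyGet? p0 0).getD 0) ((PySem.List.pyGet? p0 1).getD 0) st) s =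
    pvMM s (pvArmPoints contour aX np) := by
  induction contour generalizing s with
  | nil => rfl
  | cons point rest ih =>
    have hcons : pvArmPoints (point :: rest) aX np =
        (if aX - np ≤ ((PySem.List.pyGet? ((PySem.List.pyGet? point 0).getD []) 0).getD 0) ∧
             ((PySem.List.pyGet? ((PySem.List.pyGet? point 0).getD []) 0).getD 0) ≤ aX + np then
          ((PySem.List.pyGet? ((PySem.List.pyGet? point 0).getD []) 1).getD 0) :: pvArmPoints rest aX np
         else pvArmPoints rest aX np) := rfl
    rw [List.foldl_cons, hcons, ih]
    by_cases hc : aX - np ≤ ((PySem.List.pyGet? ((PySem.List.pyGet? point 0).getD []) 0).getD 0) ∧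
        ((PySem.List.pyGet? ((PySem.List.pyGet? point 0).getD []) 0).getD 0) ≤ aX + np
    · rw [if_pos hc]
      simp only [pvUpd, if_pos hc, pvMM]
    · rw [if_neg hc]
      simp only [pvUpd, if_neg hc]

-- one arm of A equals one component of B's result
theorem pvArm_eq (contour : List (List (List Int))) (aX np : Int) :
    (if pvArmPoints contour aX np ≠ [] then
      [((PySem.List.max? (pvArmPoints contour aX np) (fun v => v)).getD 0)
        - ((PySem.List.min? (pvArmPoints contour aX np) (fun v => v)).getD 0)]
     else []) =
    (match pvMM none (pvArmPoints contour aX np) with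
     | some (mn, mx) => [mx - mn] | none => []) := by
  cases h : pvArmPoints contour aX np with
  | nil => simp [pvMM]
  | cons p t =>
    simp only [ne_eq, reduceCtorEq, not_false_eq_true, if_pos,
      PySem.List.max?_id_cons, PySem.List.min?_id_cons, Option.getD_some]
    have : pvMM none (p :: t) = some (t.foldl min p, t.foldl max p) := by
      simp [pvMM, pvMM_some]
    simp [this]

-- ===== VERDICT (by name: the statement is the Claim_ definition above) =====
theorem calculate_touching_arm_heights_spec : Claim_equal_calculate_touching_arm_heights := by
  intro contour x y w h_ num_pixels _ _
  unfold Spec_calculate_touching_arm_heights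
  unfold calculate_touching_arm_heights calculate_touching_arm_heights_alt
  simp only [List.foldl, pvFold_pair, pvFold_arm]
  have hr := pvArm_eq contour (x + w) num_pixels
  have hl := pvArm_eq contour x num_pixels
  simp only [show (1 : Int) = -1 ↔ False by norm_num, if_false, if_pos,
    List.nil_append]
  rw [← hr, ← hl]
  cases pvArmPoints contour (x + w) num_pixels <;> cases pvArmPoints contour x num_pixels <;> simp
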